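-- pv_equiv track=rewrite | github.com/ChicagoDave/tads-doc-26 | docs/scripts/tag_code_blocks.py | find_code_blocks
-- ===== SOURCE A (Python) =====
-- def find_code_blocks(content):
--     """Parse markdown content and find all fenced code blocks.
--
--     Returns list of (line_number, lang, body) where line_number is 0-indexed
--     line of the opening fence.
--     """
--     lines = content.split('\n')
--     blocks = []
--     i = 0
--     while i < len(lines):
--         line = lines[i]
--         stripped = line.lstrip()
--         if stripped.startswith('```'):
--             # Opening fence
--             fence_indent = len(line) - len(stripped)
--             backticks = len(stripped) - len(stripped.lstrip('`'))
--             lang = stripped[backticks:].strip()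
--             open_line = i
--             # Collect body until closing fence
--             body_lines = []
--             i += 1
--             while i < len(lines):
--                 cl = lines[i]
--                 cl_stripped = cl.strip()
--                 if cl_stripped.startswith('`' * backticks) and \
--                    cl_stripped == '`' * backticks:
--                     # Closing fence
--                     break
--                 body_lines.append(lines[i])
--                 i += 1
--             body = '\n'.join(body_lines)
--             blocks.append((open_line, lang, body))
--         i += 1
--     return blocks
-- ===== SOURCE B (Python) =====
-- def find_code_blocks(content):
--     """Parse markdown content and find all fenced code blocks.
--
--     Two-stage algorithm: a first pass collects only the fence-relevant lines
--     (opening candidates and pure-backtick lines) with their precomputed data;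
--     a second pass pairs opens with closes over that sparse event list, and
--     each block's body is taken as a slice of the original line list instead
--     of being accumulated line by line.
--     """
--     lines = content.split('\n')
--     # stage 1: fence-relevant lines only
--     events = []  # (index, is_open, lstripped, pure-backtick tick count or 0)
--     for j, line in enumerate(lines):
--         ls = line.lstrip()
--         fs = line.strip()
--         is_open = ls.startswith('```')
--         k = len(fs) if fs and fs == '`' * len(fs) else 0
--         if is_open or k:
--             events.append((j, is_open, ls, k))
--     # stage 2: pair opens with closes; bodies are slices of `lines`
--     blocks = []
--     state = None  # (open_idx, lang, backticks) of the currently open fence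
--     for j, is_open, ls, k in events:
--         if state is not None:
--             if k == state[2]:
--                 oj, lang, _ = state
--                 blocks.append((oj, lang, '\n'.join(lines[oj + 1:j])))
--                 state = None
--         elif is_open:
--             bt = len(ls) - len(ls.lstrip('`'))
--             state = (j, ls[bt:].strip(), bt)
--     if state is not None:
--         oj, lang, _ = state
--         blocks.append((oj, lang, '\n'.join(lines[oj + 1:])))
--     return blocks
-- ===== Notes on version B (the rewrite author's own statement) =====
-- stated objective: alternative
-- what changed: Replaces A's nested while-loops that walk every line with a two-stage algorithm: one pass extracts only the fence-relevant lines (opening candidates and pure-backtick lines) into an event list with precomputed data, then a second pass pairs opens with closes over that sparse event list, taking each body as a slice of the original line list instead of accumulating it line by line.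
import Mathlib
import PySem

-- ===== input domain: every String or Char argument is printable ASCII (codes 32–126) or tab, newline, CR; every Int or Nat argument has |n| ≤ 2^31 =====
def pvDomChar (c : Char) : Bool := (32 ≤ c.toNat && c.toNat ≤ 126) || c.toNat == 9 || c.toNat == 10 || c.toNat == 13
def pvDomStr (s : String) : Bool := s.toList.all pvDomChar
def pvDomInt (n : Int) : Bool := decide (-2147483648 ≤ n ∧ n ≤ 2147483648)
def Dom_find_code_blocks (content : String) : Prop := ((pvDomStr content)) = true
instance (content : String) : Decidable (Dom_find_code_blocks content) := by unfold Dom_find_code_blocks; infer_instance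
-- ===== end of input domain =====

-- B replaces A's nested per-line while-loops by a two-stage algorithm: collect fence-relevant
-- lines once, then pair opens with closes over that sparse event list, bodies taken as slices.

-- ===== PORT A =====

-- content.split('\n'): exact (PySem.Chars.splitOn is s.split(sep) for non-empty sep)
def pvSplitLines (content : String) : List String :=
  (PySem.Chars.splitOn content.toList "\n".toList).map String.ofList

-- s.lstrip('`'): drops exactly the leading backticks
def pvLstripTicks (cs : List Char) : List Char := cs.dropWhile (· == '`')

-- inner while-loop of A: collect body lines until a closing fence; returns (body_lines, i at break/EOF).
-- fuel is only a structural-termination guard: every call below supplies fuel with lines.length ≤ fuel + i,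
-- so the fuel-0 branch coincides with the loop's own exit test (i ≥ length).
def pvInnerA (lines : List String) (backticks : Nat) :
    Nat → Nat → List String → List String × Nat
  | 0, i, body => (body, i)
  | fuel + 1, i, body =>
    if h : i < lines.length then
      let cl := lines[i]
      let clStripped := PySem.Str.strip cl
      let ticks := String.ofList (List.replicate backticks '`')
      if PySem.Str.startswith clStripped ticks && clStripped == ticks then
        (body, i)  -- break: closing fence
      else
        pvInnerA lines backticks fuel (i + 1) (body ++ [cl])
    else (body, i)

-- outer while-loop of A (same fuel guard; supplied fuel always suffices)
def pvOuterA (lines : List String) :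
    Nat → Nat → List (Int × String × String) → List (Int × String × String)
  | 0, _, blocks => blocks
  | fuel + 1, i, blocks =>
    if h : i < lines.length then
      let line := lines[i]
      let stripped := PySem.Str.lstrip line
      if PySem.Str.startswith stripped "```" then
        let _fence_indent := PySem.Str.len line - PySem.Str.len stripped  -- computed by A, unused
        let backticks := stripped.toList.length - (pvLstripTicks stripped.toList).length
        let lang := String.ofList (PySem.Chars.strip (PySem.List.slice stripped.toList (some (backticks : Int)) none))
        let r := pvInnerA lines backticks fuel (i + 1) []
        let body := PySem.Str.join "\n" r.1
        pvOuterA lines fuel (r.2 + 1) (blocks ++ [((i : Int), lang, body)])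
      else
        pvOuterA lines fuel (i + 1) blocks
    else blocks

def find_code_blocks (content : String) : List (Int × String × String) :=
  pvOuterA (pvSplitLines content) ((pvSplitLines content).length + 1) 0 []

-- ===== PORT B =====

-- stage 1, per line: 'if is_open or k: events.append((j, is_open, ls, k))' as an Option
def pvEvent? (j : Int) (line : String) : Option (Int × Bool × List Char × Nat) :=
  let ls := PySem.Chars.lstrip line.toList
  let fs := PySem.Chars.strip line.toList
  let isOpen := PySem.Chars.startswith ls "```".toList
  let k := if fs ≠ [] ∧ fs = List.replicate fs.length '`' then fs.length else 0
  if isOpen = true ∨ k ≠ 0 then some (j, isOpen, ls, k) else none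

-- stage 2: pair opens with closes over the event list; bodies are slices of `lines`
def pvPair (lines : List String) :
    List (Int × String × String) → Option (Int × String × Nat) →
    List (Int × Bool × List Char × Nat) → List (Int × String × String)
  | blocks, st, [] =>
    match st with
    | none => blocks
    | some (oj, lg, _) =>
      blocks ++ [(oj, lg, PySem.Str.join "\n" (PySem.List.slice lines (some (oj + 1)) none))]
  | blocks, st, (j, isOpen, ls, k) :: rest =>
    match st with
    | some (oj, lg, bt) =>
      if k = bt then
        pvPair lines (blocks ++ [(oj, lg, PySem.Str.join "\n" (PySem.List.slice lines (some (oj + 1)) (some j)))]) none rest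
      else
        pvPair lines blocks (some (oj, lg, bt)) rest
    | none =>
      if isOpen = true then
        let bt := ls.length - (ls.dropWhile (· == '`')).length
        let lang := String.ofList (PySem.Chars.strip (PySem.List.slice ls (some (bt : Int)) none))
        pvPair lines blocks (some (j, lang, bt)) rest
      else
        pvPair lines blocks none rest

def find_code_blocks_alt (content : String) : List (Int × String × String) :=
  let lines := pvSplitLines content
  pvPair lines [] none ((PySem.List.enumerate lines).filterMap (fun p => pvEvent? p.1 p.2))

-- ===== PRECONDITION & SPEC =====
def Spec_find_code_blocks (content : String) (out : List (Int × String × String)) : Prop := out = find_code_blocks_alt content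
instance (content : String) (out : List (Int × String × String)) : Decidable (Spec_find_code_blocks content out) := by unfold Spec_find_code_blocks; infer_instance

-- ===== CLAIM (what is proved, stated in full; the proofs are below) =====
def Claim_equal_find_code_blocks : Prop := ∀ (content : String), Dom_find_code_blocks content → Spec_find_code_blocks content (find_code_blocks content)

-- ===== LEMMAS AND PROOFS =====

-- B's event list restricted to the lines from index i on
def pvEvFrom (lines : List String) (i : Nat) : List (Int × Bool × List Char × Nat) :=
  ((PySem.List.enumerate lines).drop i).filterMap (fun p => pvEvent? p.1 p.2)

theorem pv_drop_enum (lines : List String) (i : Nat) (h : i < lines.length) :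
    (PySem.List.enumerate lines).drop i = (((i : Int), lines[i])) :: (PySem.List.enumerate lines).drop (i + 1) := by
  have hlen : i < (PySem.List.enumerate lines).length := by
    simpa [PySem.List.length_enumerate] using h
  rw [List.drop_eq_getElem_cons hlen]
  simp [PySem.List.getElem_enumerate]

theorem pvEvFrom_nil (lines : List String) (i : Nat) (h : lines.length ≤ i) :
    pvEvFrom lines i = [] := by
  unfold pvEvFrom
  rw [List.drop_eq_nil_of_le (by simp [PySem.List.length_enumerate]; omega)]
  rfl

theorem pvEvFrom_step (lines : List String) (i : Nat) (h : i < lines.length) :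
    pvEvFrom lines i = (pvEvent? (i : Int) lines[i]).toList ++ pvEvFrom lines (i + 1) := by
  unfold pvEvFrom
  rw [pv_drop_enum lines i h, List.filterMap_cons]
  cases pvEvent? (i : Int) lines[i] <;> simp

-- the inner loop never moves i backwards
theorem pvInnerA_ge (lines : List String) (bt : Nat) :
    ∀ fuel i body, i ≤ (pvInnerA lines bt fuel i body).2 := by
  intro fuel
  induction fuel with
  | zero => intro i body; simp [pvInnerA]
  | succ fuel ih =>
    intro i body
    simp only [pvInnerA]
    split
    · split
      · simp
      · exact le_trans (Nat.le_succ i) (ih (i + 1) (body ++ [_]))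
    · simp

-- A's closing-fence test is String equality with the pure-backtick line
theorem pv_break_iff (cl : String) (bt : Nat) :
    (PySem.Str.startswith (PySem.Str.strip cl) (String.ofList (List.replicate bt '`')) &&
      PySem.Str.strip cl == String.ofList (List.replicate bt '`')) = true ↔
    PySem.Chars.strip cl.toList = List.replicate bt '`' := by
  constructor
  · intro h
    have h2 : PySem.Str.strip cl = String.ofList (List.replicate bt '`') := by
      have := (Bool.and_eq_true _ _).mp h
      exact eq_of_beq this.2
    have := congrArg String.toList h2
    simpa using this
  · intro h
    have h2 : PySem.Str.strip cl = String.ofList (List.replicate bt '`') := by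
      apply String.toList_injective
      simpa using h
    rw [h2]
    simp [PySem.Str.startswith, PySem.Chars.startswith_iff]

-- an opening fence has at least 3 backticks
theorem pv_open_bt (ls : List Char) (h : PySem.Chars.startswith ls "```".toList = true) :
    3 ≤ ls.length - (ls.dropWhile (· == '`')).length := by
  have := (PySem.Chars.startswith_iff _ _).mp h
  obtain ⟨t, ht⟩ := this
  subst ht
  have : ∀ l : List Char, (l.dropWhile (· == '`')).length ≤ l.length := fun l => List.length_dropWhile_le _ _
  have h3 := this t
  simp [List.dropWhile]
  omega

-- flushing an open block at end of events = appending the tail slice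
theorem pv_flush_eq (lines : List String) (blocks : List (Int × String × String)) (oj : Nat)
    (lg : String) (bt : Nat) (body : List String) (hb : body = lines.drop (oj + 1)) :
    pvPair lines blocks (some ((oj : Int), lg, bt)) [] =
      blocks ++ [((oj : Int), lg, PySem.Str.join "\n" body)] := by
  simp only [pvPair]
  have hcast : ((oj : Int) + 1) = (((oj + 1 : Nat)) : Int) := by push_cast; ring
  rw [hcast, PySem.List.slice_from_natCast, ← hb]

-- with sufficient fuel, B's stage-2 loop in the open state from the events of lines[i:] equals:
-- run A's inner loop, flush the block, continue B's loop closed after the closing fence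
theorem pv_inner_eq (lines : List String) (bt : Nat) (hbt : 3 ≤ bt) :
    ∀ fuel i body blocks oj lg, lines.length ≤ fuel + i → oj + 1 ≤ i → i ≤ lines.length →
      body = (lines.drop (oj + 1)).take (i - (oj + 1)) →
      pvPair lines blocks (some ((oj : Int), lg, bt)) (pvEvFrom lines i) =
        pvPair lines (blocks ++ [((oj : Int), lg, PySem.Str.join "\n" (pvInnerA lines bt fuel i body).1)]) none
          (pvEvFrom lines ((pvInnerA lines bt fuel i body).2 + 1)) := by
  intro fuel
  induction fuel with
  | zero =>
    intro i body blocks oj lg hf hoj hil hbody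
    have hi : i = lines.length := by omega
    have hb : body = lines.drop (oj + 1) := by
      rw [hbody]
      exact List.take_of_length_le (by rw [List.length_drop]; omega)
    rw [pvEvFrom_nil lines i (by omega)]
    simp only [pvInnerA]
    rw [pvEvFrom_nil lines (i + 1) (by omega)]
    rw [pv_flush_eq lines blocks oj lg bt body hb]
    simp [pvPair]
  | succ fuel ih =>
    intro i body blocks oj lg hf hoj hil hbody
    by_cases h : i < lines.length
    · by_cases hbrk : PySem.Chars.strip lines[i].toList = List.replicate bt '`'
      · -- closing fence at line i
        have hbt0 : bt ≠ 0 := by omega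
        have hev : pvEvent? (i : Int) lines[i] =
            some ((i : Int), PySem.Chars.startswith (PySem.Chars.lstrip lines[i].toList) "```".toList,
              PySem.Chars.lstrip lines[i].toList, bt) := by
          simp [pvEvent?, hbrk, hbt0]
        have hA : (PySem.Str.startswith (PySem.Str.strip lines[i]) (String.ofList (List.replicate bt '`')) &&
            PySem.Str.strip lines[i] == String.ofList (List.replicate bt '`')) = true :=
          (pv_break_iff lines[i] bt).mpr hbrk
        rw [pvEvFrom_step lines i h, hev]
        simp only [Option.toList, List.singleton_append]
        simp only [pvPair, pvInnerA, h, dif_pos, hA, if_pos]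
        congr 3
        have hc1 : ((oj : Int) + 1) = (((oj + 1 : Nat)) : Int) := by push_cast; ring
        rw [hc1, PySem.List.slice_natCast, ← hbody]
      · -- not a closing fence: A appends the line to the body, B skips a non-matching event
        have hA : (PySem.Str.startswith (PySem.Str.strip lines[i]) (String.ofList (List.replicate bt '`')) &&
            PySem.Str.strip lines[i] == String.ofList (List.replicate bt '`')) = false := by
          cases hx : (PySem.Str.startswith (PySem.Str.strip lines[i]) (String.ofList (List.replicate bt '`')) &&
              PySem.Str.strip lines[i] == String.ofList (List.replicate bt '`')) with
          | false => rfl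
          | true => exact absurd ((pv_break_iff lines[i] bt).mp hx) hbrk
        have hbody' : body ++ [lines[i]] = (lines.drop (oj + 1)).take (i + 1 - (oj + 1)) := by
          have h1 : i + 1 - (oj + 1) = (i - (oj + 1)) + 1 := by omega
          have h2 : oj + 1 + (i - (oj + 1)) = i := by omega
          rw [h1, List.take_add_one, ← hbody, List.getElem?_drop, h2, List.getElem?_eq_getElem h]
          rfl
        have hstep : pvInnerA lines bt (fuel + 1) i body = pvInnerA lines bt fuel (i + 1) (body ++ [lines[i]]) := by
          simp only [pvInnerA, h, dif_pos]
          rw [if_neg (by rw [hA]; simp)]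
        rw [hstep]
        rw [pvEvFrom_step lines i h]
        rcases hev : pvEvent? (i : Int) lines[i] with _ | ⟨j', io, ls', k⟩
        · simp only [Option.toList, List.nil_append]
          exact ih (i + 1) (body ++ [lines[i]]) blocks oj lg (by omega) (by omega) (by omega) hbody'
        · have hk : k ≠ bt := by
            simp only [pvEvent?] at hev
            split at hev
            · rename_i hc
              split at hev
              · simp only [Option.some.injEq, Prod.mk.injEq] at hev
                obtain ⟨-, -, -, hk4⟩ := hev
                intro hkbt
                apply hbrk
                rw [hc.2]
                rw [hk4, hkbt]
              · exact absurd hev (by simp)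
            · split at hev
              · simp only [Option.some.injEq, Prod.mk.injEq] at hev
                obtain ⟨-, -, -, hk4⟩ := hev
                omega
              · exact absurd hev (by simp)
          simp only [Option.toList, List.singleton_append, pvPair]
          rw [if_neg hk]
          exact ih (i + 1) (body ++ [lines[i]]) blocks oj lg (by omega) (by omega) (by omega) hbody'
    · -- i = lines.length: EOF flush
      have hi : i = lines.length := by omega
      have hb : body = lines.drop (oj + 1) := by
        rw [hbody]
        exact List.take_of_length_le (by rw [List.length_drop]; omega)
      rw [pvEvFrom_nil lines i (by omega)]
      simp only [pvInnerA, h, dif_neg, not_false_iff]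
      rw [pvEvFrom_nil lines (i + 1) (by omega)]
      rw [pv_flush_eq lines blocks oj lg bt body hb]
      simp [pvPair]

-- with sufficient fuel, A's outer loop from line i equals B's stage-2 loop (closed state)
-- on the events of the remaining lines
theorem pv_outer_eq (lines : List String) :
    ∀ fuel i blocks, lines.length < fuel + i →
      pvOuterA lines fuel i blocks = pvPair lines blocks none (pvEvFrom lines i) := by
  intro fuel
  induction fuel with
  | zero =>
    intro i blocks hf
    rw [pvEvFrom_nil lines i (by omega)]
    simp [pvOuterA, pvPair]
  | succ fuel ih =>
    intro i blocks hf
    by_cases h : i < lines.length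
    · by_cases hsw : PySem.Str.startswith (PySem.Str.lstrip lines[i]) "```" = true
      · -- opening fence at line i
        have hswc : PySem.Chars.startswith (PySem.Chars.lstrip lines[i].toList) "```".toList = true := by
          simpa using hsw
        have hbt : 3 ≤ (PySem.Chars.lstrip lines[i].toList).length -
            ((PySem.Chars.lstrip lines[i].toList).dropWhile (· == '`')).length :=
          pv_open_bt _ hswc
        have hev : pvEvent? (i : Int) lines[i] =
            some ((i : Int), PySem.Chars.startswith (PySem.Chars.lstrip lines[i].toList) "```".toList,
              PySem.Chars.lstrip lines[i].toList,
              (if PySem.Chars.strip lines[i].toList ≠ [] ∧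
                  PySem.Chars.strip lines[i].toList = List.replicate (PySem.Chars.strip lines[i].toList).length '`'
                then (PySem.Chars.strip lines[i].toList).length else 0)) := by
          simp only [pvEvent?]
          rw [if_pos (Or.inl hswc)]
        rw [pvEvFrom_step lines i h, hev]
        simp only [Option.toList, List.singleton_append]
        simp only [pvOuterA, h, dif_pos, hsw, if_pos, pvPair, hswc]
        simp only [pvLstripTicks, PySem.Str.toList_lstrip]
        rw [pv_inner_eq lines _ hbt fuel (i + 1) [] blocks i _ (by omega) (le_refl _) (by omega) (by simp)]
        refine ih _ _ ?_
        have := pvInnerA_ge lines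
          ((PySem.Chars.lstrip lines[i].toList).length -
            ((PySem.Chars.lstrip lines[i].toList).dropWhile (· == '`')).length) fuel (i + 1) []
        omega
      · -- not an opening fence
        rcases hev : pvEvent? (i : Int) lines[i] with _ | ⟨j', io, ls', k⟩
        · rw [pvEvFrom_step lines i h, hev]
          simp only [Option.toList, List.nil_append]
          simp only [pvOuterA, h, dif_pos]
          rw [if_neg hsw]
          exact ih (i + 1) blocks (by omega)
        · have hswc : PySem.Chars.startswith (PySem.Chars.lstrip lines[i].toList) "```".toList = false := by
            rw [Bool.not_eq_true] at hsw
            simpa using hsw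
          have hio : io = false := by
            simp only [pvEvent?, hswc] at hev
            split at hev
            · split at hev
              · simp only [Option.some.injEq, Prod.mk.injEq] at hev
                exact hev.2.1.symm
              · exact absurd hev (by simp)
            · split at hev
              · simp only [Option.some.injEq, Prod.mk.injEq] at hev
                exact hev.2.1.symm
              · exact absurd hev (by simp)
          rw [pvEvFrom_step lines i h, hev, hio]
          simp only [Option.toList, List.singleton_append, pvPair]
          rw [if_neg (by simp)]
          simp only [pvOuterA, h, dif_pos]
          rw [if_neg (by rw [Bool.not_eq_true] at hsw; rw [hsw]; simp)]
          exact ih (i + 1) blocks (by omega)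
    · rw [pvEvFrom_nil lines i (by omega)]
      simp [pvOuterA, pvPair, h]

-- ===== VERDICT (by name: the statement is the Claim_ definition above) =====
theorem find_code_blocks_spec : Claim_equal_find_code_blocks := by
  intro content _
  unfold Spec_find_code_blocks find_code_blocks find_code_blocks_alt
  have := pv_outer_eq (pvSplitLines content) ((pvSplitLines content).length + 1) 0 [] (by omega)
  simpa [pvEvFrom] using this
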